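-- pv_equiv track=rewrite | github.com/vilinicz/singularis | src/singularis/imrad_spacy_matchers.py | decide_label
-- ===== SOURCE A (Python) =====
-- from typing import List, Dict, Tuple, Optional
--
-- def decide_label(scores: Dict[str,int], section: str, had_matches: bool) -> str:
--     if section=="REFERENCES" or not had_matches:
--         return "OTHER" if section != "RESULTS" else "Result"
--     m = max(scores.values())
--     if m <= 0: return "OTHER"
--     cands = [lab for lab,v in scores.items() if v==m]
--     order = ["Result","Experiment","Technique","Analysis","Dataset","Hypothesis","Conclusion","Input Fact"]
--     for lab in order:
--         if lab in cands: return lab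
--     return cands[0]
-- ===== SOURCE B (Python) =====
-- def decide_label(scores, section, had_matches):
--     if section == "REFERENCES" or not had_matches:
--         return "OTHER" if section != "RESULTS" else "Result"
--     order = ["Result","Experiment","Technique","Analysis","Dataset","Hypothesis","Conclusion","Input Fact"]
--     rank = {lab: i for i, lab in enumerate(order)}
--     lab, m = max(scores.items(), key=lambda kv: (kv[1], -rank.get(kv[0], len(order))))
--     return lab if m > 0 else "OTHER"
-- ===== Notes on version B (the rewrite author's own statement) =====
-- stated objective: alternative
-- what changed: Replaces max-over-values + collect-tied-candidates + scan-the-priority-list with a single max over items under the composite key (value, -priority-rank), fusing max-finding and tie-breaking into one pass.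
import Mathlib
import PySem

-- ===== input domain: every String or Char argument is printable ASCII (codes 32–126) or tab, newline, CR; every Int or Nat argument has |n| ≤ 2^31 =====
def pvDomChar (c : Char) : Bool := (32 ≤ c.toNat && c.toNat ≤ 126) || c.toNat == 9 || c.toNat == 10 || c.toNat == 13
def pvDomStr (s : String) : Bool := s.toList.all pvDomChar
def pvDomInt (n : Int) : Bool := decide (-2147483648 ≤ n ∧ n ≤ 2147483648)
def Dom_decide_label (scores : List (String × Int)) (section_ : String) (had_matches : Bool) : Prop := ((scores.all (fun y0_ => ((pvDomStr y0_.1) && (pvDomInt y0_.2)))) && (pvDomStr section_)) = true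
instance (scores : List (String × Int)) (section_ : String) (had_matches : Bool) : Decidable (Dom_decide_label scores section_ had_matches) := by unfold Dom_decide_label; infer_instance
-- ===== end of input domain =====

-- B replaces A's max-over-values + collect-tied-candidates + priority-list scan with one max over items under a composite key (value, -rank); return values proved equal wherever A returns.

-- the priority list (the same literal appears in both Pythons)
def pvOrder : List String := ["Result","Experiment","Technique","Analysis","Dataset","Hypothesis","Conclusion","Input Fact"]

-- ===== PORT A =====
-- 'for lab in order: if lab in cands: return lab' then 'return cands[0]'
def dlScan : List String → List String → String
  | [], cands => (PySem.List.pyGet? cands 0).getD ""   -- cands[0]; cands is nonempty wherever A reaches this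
  | lab :: rest, cands => if cands.contains lab then lab else dlScan rest cands

def decide_label (scores : List (String × Int)) (section_ : String) (had_matches : Bool) : String :=
  if section_ == "REFERENCES" || !had_matches then
    (if section_ != "RESULTS" then "OTHER" else "Result")
  else
    let m := (PySem.List.max? (scores.map (·.2)) (fun v => v)).getD 0  -- max(scores.values()); none (ValueError) excluded by Pre_
    if m ≤ 0 then "OTHER"
    else dlScan pvOrder ((scores.filter (fun kv => kv.2 == m)).map (·.1))

-- ===== PORT B =====
-- rank = {lab: i for i, lab in enumerate(order)}
def dlRank : PySem.Dict String Int :=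
  (PySem.List.enumerate pvOrder).foldl (fun d p => d.insert p.2 p.1) PySem.Dict.empty

-- the composite key (kv[1], -rank.get(kv[0], len(order)))
def dlKey (kv : String × Int) : Int × Int :=
  (kv.2, -((dlRank.get? kv.1).getD ((pvOrder.length : Int))))

-- Python's '>' on int pairs, lexicographic
def dlKeyGt (a b : Int × Int) : Bool := a.1 > b.1 || (a.1 == b.1 && a.2 > b.2)

def decide_label_alt (scores : List (String × Int)) (section_ : String) (had_matches : Bool) : String :=
  if section_ == "REFERENCES" || !had_matches then
    (if section_ != "RESULTS" then "OTHER" else "Result")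
  else
    match scores with
    | [] => ""   -- Python's max raises ValueError here; excluded by Pre_
    | kv0 :: rest =>
      let best := rest.foldl (fun b kv => if dlKeyGt (dlKey kv) (dlKey b) then kv else b) kv0
      if best.2 > 0 then best.1 else "OTHER"

-- ===== PRECONDITION & SPEC =====
-- Pre_ excludes only the inputs on which Python A raises (ValueError from max on an empty dict once both guards pass); B raises there too.
def Pre_decide_label (scores : List (String × Int)) (section_ : String) (had_matches : Bool) : Prop :=
  section_ = "REFERENCES" ∨ had_matches = false ∨ scores ≠ []
instance (scores : List (String × Int)) (section_ : String) (had_matches : Bool) : Decidable (Pre_decide_label scores section_ had_matches) := by unfold Pre_decide_label; infer_instance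
def pvWitness_decide_label : (List (String × Int)) × String × Bool := ([("Result", 2), ("x", 2)], "INTRO", true)

def Spec_decide_label (scores : List (String × Int)) (section_ : String) (had_matches : Bool) (out : String) : Prop := out = decide_label_alt scores section_ had_matches
instance (scores : List (String × Int)) (section_ : String) (had_matches : Bool) (out : String) : Decidable (Spec_decide_label scores section_ had_matches out) := by unfold Spec_decide_label; infer_instance

-- ===== CLAIM (what is proved, stated in full; the proofs are below) =====
def Claim_equal_decide_label : Prop := ∀ (scores : List (String × Int)) (section_ : String) (had_matches : Bool), Dom_decide_label scores section_ had_matches → Pre_decide_label scores section_ had_matches → Spec_decide_label scores section_ had_matches (decide_label scores section_ had_matches)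

-- ===== LEMMAS AND PROOFS =====

-- B's rank.get(lab, len(order)) is the index of lab in the priority list (its length if absent)
theorem rk_eq (s : String) : (dlRank.get? s).getD ((pvOrder.length : Int)) = ((pvOrder.idxOf s : Nat) : Int) := by
  have h : dlRank = PySem.Dict.mk [("Result",0),("Experiment",1),("Technique",2),("Analysis",3),("Dataset",4),("Hypothesis",5),("Conclusion",6),("Input Fact",7)] := by decide
  rw [h]
  simp [PySem.Dict.get?_mk_cons, pvOrder, List.idxOf_cons]
  split_ifs <;> simp_all [Bool.cond_eq_ite, PySem.Dict.get?]

-- A's priority scan on a single candidate returns it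
theorem dlScan_singleton (ord : List String) (c : String) : dlScan ord [c] = c := by
  induction ord with
  | nil => simp [dlScan, PySem.List.pyGet?, PySem.List.pyIdx?]
  | cons lab rest ih =>
    simp only [dlScan, List.contains_cons]
    by_cases h : c = lab <;> simp [h, ih]

-- the two leading candidates may be replaced by the earlier-indexed one without changing A's scan
theorem dlScan_pair (ord : List String) (a b : String) (t : List String) :
    dlScan ord (a :: b :: t) = dlScan ord ((if ord.idxOf b < ord.idxOf a then b else a) :: t) := by
  induction ord with
  | nil =>
    have h0 : (0:Int) ≤ (t.length:Int) + 1 := by positivity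
    simp [dlScan, PySem.List.pyGet?, PySem.List.pyIdx?, h0]
  | cons lab rest ih =>
    simp only [dlScan, List.contains_cons, List.idxOf_cons, beq_iff_eq, Bool.cond_eq_ite]
    by_cases ha : a = lab
    · subst ha
      by_cases hb : b = a
      · subst hb; simp
      · simp
    · by_cases hb : b = lab
      · subst hb
        have ha' : b ≠ a := fun h => ha h.symm
        simp [ha']
      · have ha' : lab ≠ a := fun h => ha h.symm
        have hb' : lab ≠ b := fun h => hb h.symm
        simp [ha', hb', apply_ite (Eq lab), ih]

theorem le_foldl_max' : ∀ (l : List Int) (x : Int), x ≤ l.foldl max x := by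
  intro l
  induction l with
  | nil => intro x; simp
  | cons a l ih => intro x; rw [List.foldl_cons]; exact le_trans (le_max_left x a) (ih _)

-- B's fold step keeps the larger value
theorem step_snd (kv0 kv : String × Int) :
    (if dlKeyGt (dlKey kv) (dlKey kv0) then kv else kv0).2 = max kv0.2 kv.2 := by
  simp only [dlKeyGt, dlKey]
  split_ifs with h <;> simp at h <;> omega

-- A's else-branch, as a function of the score list
def aBody (scores : List (String × Int)) : String :=
  let m := (PySem.List.max? (scores.map (·.2)) (fun v => v)).getD 0
  if m ≤ 0 then "OTHER" else dlScan pvOrder ((scores.filter (fun kv => kv.2 == m)).map (·.1))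

-- collapsing the two leading entries to B's fold-step winner does not change A's answer
theorem aBody_step (kv0 kv : String × Int) (rest : List (String × Int)) :
    aBody (kv0 :: kv :: rest) = aBody ((if dlKeyGt (dlKey kv) (dlKey kv0) then kv else kv0) :: rest) := by
  set w := if dlKeyGt (dlKey kv) (dlKey kv0) then kv else kv0 with hw
  have hsnd : w.2 = max kv0.2 kv.2 := step_snd kv0 kv
  have hm : (PySem.List.max? ((kv0 :: kv :: rest).map (·.2)) (fun v => v)) =
      (PySem.List.max? ((w :: rest).map (·.2)) (fun v => v)) := by
    rw [List.map_cons, List.map_cons, List.map_cons, PySem.List.max?_id_cons, PySem.List.max?_id_cons,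
        List.foldl_cons, hsnd]
  rw [aBody, aBody, hm]
  set m := (PySem.List.max? ((w :: rest).map (·.2)) (fun v => v)).getD 0 with hmdef
  by_cases hle : m ≤ 0
  · simp [hle]
  · simp only [if_neg hle]
    have hmax : max kv0.2 kv.2 ≤ m := by
      rw [hmdef, List.map_cons, PySem.List.max?_id_cons, Option.getD_some, ← hsnd]
      exact le_foldl_max' _ _
    by_cases hv : kv0.2 = kv.2
    · have hwv : w.2 = kv0.2 := by omega
      by_cases hM : kv0.2 = m
      · have h1 : (kv0.2 == m) = true := by simp [hM]
        have h2 : (kv.2 == m) = true := by simp [← hv, hM]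
        have h3 : (w.2 == m) = true := by simp [hwv, hM]
        simp only [List.filter_cons, h1, h2, h3, if_pos, List.map_cons]
        rw [dlScan_pair]
        congr 1
        have hkey : dlKeyGt (dlKey kv) (dlKey kv0) = (pvOrder.idxOf kv.1 < pvOrder.idxOf kv0.1 : Bool) := by
          simp [dlKeyGt, dlKey, rk_eq, hv]
        rw [hw, hkey]
        by_cases hlt : pvOrder.idxOf kv.1 < pvOrder.idxOf kv0.1 <;> simp [hlt]
      · have h1 : (kv0.2 == m) = false := by simp [hM]
        have h2 : (kv.2 == m) = false := by simp; omega
        have h3 : (w.2 == m) = false := by simp [hwv]; omega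
        simp [List.filter_cons, h1, h2, h3]
    · rcases lt_or_gt_of_ne (show kv0.2 ≠ kv.2 from hv) with hlt | hgt
      · have hc : dlKeyGt (dlKey kv) (dlKey kv0) = true := by
          simp [dlKeyGt, dlKey]; omega
        have hwkv : w = kv := by rw [hw, if_pos hc]
        have h1 : (kv0.2 == m) = false := by simp; omega
        simp [List.filter_cons, h1, hwkv]
      · have hc : dlKeyGt (dlKey kv) (dlKey kv0) = false := by
          simp [dlKeyGt, dlKey]; omega
        have hwkv : w = kv0 := by rw [hw, if_neg (by simp [hc])]
        have h2 : (kv.2 == m) = false := by simp; omega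
        simp [List.filter_cons, h2, hwkv]

-- A's else-branch equals B's single fold with the composite key
theorem main_fold (rest : List (String × Int)) : ∀ kv0,
    aBody (kv0 :: rest) =
      (let best := rest.foldl (fun b kv => if dlKeyGt (dlKey kv) (dlKey b) then kv else b) kv0
       if best.2 > 0 then best.1 else "OTHER") := by
  induction rest with
  | nil =>
    intro kv0
    simp only [List.foldl_nil]
    rw [aBody]
    simp only [List.map_cons, List.map_nil, PySem.List.max?_id_cons, List.foldl_nil, Option.getD_some]
    by_cases h : kv0.2 ≤ 0
    · simp [h]
    · have : (kv0.2 == kv0.2) = true := by simp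
      simp [h, List.filter_cons, this, dlScan_singleton]
  | cons kv rest' ih =>
    intro kv0
    rw [aBody_step, List.foldl_cons, ih]

-- ===== VERDICT (by name: the statement is the Claim_ definition above) =====
theorem decide_label_spec : Claim_equal_decide_label := by
  intro scores section_ had_matches _ hpre
  unfold Spec_decide_label
  by_cases hg : (section_ == "REFERENCES" || !had_matches) = true
  · simp [decide_label, decide_label_alt, hg]
  · have hne : scores ≠ [] := by
      rcases hpre with h | h | h
      · exact absurd (by simp [h]) hg
      · exact absurd (by simp [h]) hg
      · exact h
    obtain ⟨kv0, rest, rfl⟩ := List.exists_cons_of_ne_nil hne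
    simp only [decide_label, decide_label_alt, if_neg hg]
    exact main_fold rest kv0
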